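/- GENERATED by tools/from_farm_form.py from prooffarm-gif/accepted/DGifSlurp.9/Lemmas.lean (a worked proof of the farm's unit `DGifSlurp.9`,
   accepted by the verdict) — do not edit. -/
import Gif.Spec.Units.DGifSlurp_9
import Gif.Spec.AllSegs

/-!
  Lemmas for the unit `DGifSlurp.9` (0x10a7d4 … 0x10a81f; dgif_lib.c:1266-1273: THE MOVE of the pending extension list to the last
  counted image). Two layers:

  PURE (no machine state: heap, forest, two memories)
      seg9_moved            the forest after the move: the last image's `ext := Fc.pend`, `pend := none`
      seg9_img_structs      the structural windows of the counted images are windows of the forest, none at the array's base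
      seg9_pend_structs     the same for the pending list's window
      seg9_miss             a range that misses the five windows of the move reads the same
      seg9_move_mem         THE STEP OF THE INVARIANTS: `HeapInv` kept, `GifOK` for `seg9_moved` (`Shape.set_saved_pend` with
                            `SavedAt.set_last`; `Forest.owned_move_pend` with `Owns.perm`), `rem` unchanged
      seg9_moved_complete   every counted image of `seg9_moved` has its raster
      seg9_complete         … and of the unchanged forest (the NULL arm)
  WALKS (one per arm of `if (GifFile->ExtensionBlocks)`; the arm is fixed by the ghost `Fc.pend` before the walk)
      seg9_null             0x10a7d4 … `je` taken … 0x10a81f: `IR` → `Rec` for the same forest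
      seg9_move             0x10a7d4 … the four stores … 0x10a81f: `IR` → `Rec` for `seg9_moved`
-/

open X86 X86.User Asan ProgX.Base ProgX.Base.Spec Gif.Spec

set_option maxRecDepth 4000
set_option maxHeartbeats 4000000

namespace Gif.Spec.DGifSlurp_9

/-- **The forest after the move** (dgif_lib.c:1266-1272): the last counted image owns the pending list, nothing is pending. -/
def seg9_moved (Fc : Forest) (s : Saved) (init : List Img) (g : Img) : Forest :=
  { Fc with saved := some { s with imgs := init ++ [{ g with ext := Fc.pend }] }, pend := none }

/-- The structural windows of the counted images are windows of the forest, and none has the base of the array. -/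
theorem seg9_img_structs {Hc : Heap} {Fc : Forest} {R : Rd} (G : carry_Geo Hc Fc R) {s : Saved} (hsv : Fc.saved = some s) :
    ∀ o, o ∈ s.imgs.flatMap Img.structs → o ∈ Fc.structs ∧ o.1 ≠ s.arr := by
  intro o ho
  have h0 := G.apart
  unfold Forest.structs at h0
  rw [hsv] at h0
  obtain ⟨h1, _, _⟩ := List.pairwise_append.mp h0
  obtain ⟨_, h2, _⟩ := List.pairwise_append.mp h1
  simp only [Saved.structs] at h2
  obtain ⟨h3, _⟩ := List.pairwise_cons.mp h2
  refine ⟨?_, ?_⟩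
  · unfold Forest.structs
    rw [hsv]
    simp only [Saved.structs]
    exact List.mem_append_left _ (List.mem_append_right _ (List.mem_cons_of_mem _ ho))
  · intro e
    exact h3 o ho e.symm

/-- The structural window of the pending list is a window of the forest, and has not the base of the array. -/
theorem seg9_pend_structs {Hc : Heap} {Fc : Forest} {R : Rd} (G : carry_Geo Hc Fc R) {s : Saved} (hsv : Fc.saved = some s) :
    ∀ o, o ∈ Exts.structs Fc.pend → o ∈ Fc.structs ∧ o.1 ≠ s.arr := by
  intro o ho
  have hc := G.cross.2.2.2.2 (s.arr, 56 * s.imgs.length) (by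
    rw [hsv]
    simp only [Saved.structs, List.mem_cons, true_or]) o ho
  refine ⟨?_, ?_⟩
  · unfold Forest.structs
    exact List.mem_append_right _ ho
  · intro e
    exact hc e.symm
/-- **A range that misses the five windows of the move reads the same** (the windows as `seg9_move_mem` has them). -/
theorem seg9_miss {mem mem' : Mem} {lo hi slot gif : Nat}
    (hs : Mem.SameExcept
      [⟨lo, hi⟩, ⟨slot + 48, slot + 56⟩, ⟨slot + 40, slot + 44⟩, ⟨gif + 88, gif + 96⟩, ⟨gif + 80, gif + 84⟩] mem mem')
    (a b : Nat) (h0 : hi ≤ a)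
    (h1 : b ≤ slot + 40 ∨ slot + 56 ≤ a ∨ (slot + 44 ≤ a ∧ b ≤ slot + 48))
    (h2 : b ≤ gif + 80 ∨ gif + 96 ≤ a ∨ (gif + 84 ≤ a ∧ b ≤ gif + 88)) : Mem.EqOn a b mem mem' := by
  apply hs.eqOn
  intro w hw
  simp only [List.mem_cons, List.not_mem_nil, or_false] at hw
  rcases hw with e | e | e | e | e
  all_goals
    rw [e]
    simp only
    omega

/-- **THE MOVE, IN MEMORY** (dgif_lib.c:1266-1272). The memory changed in a stack window below the cursor (the return addresses the
four check calls pushed), in `sp->ExtensionBlocks` and `sp->ExtensionBlockCount` of the last counted slot, and in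
`gif.ExtensionBlocks`, `gif.ExtensionBlockCount`; the four fields hold the pending list's address, its count, 0 and 0. Then the heap's
invariant holds as before, the state invariant holds for the forest `seg9_moved` (`Shape.set_saved_pend` with `SavedAt.set_last`;
`Forest.owned_move_pend`: no object moves), and the reader is where it was. -/
theorem seg9_move_mem {Hc : Heap} {rest : List Obj} {fr : List (Nat × FrameLayout)} {top : Nat} {Fc : Forest} {R : Rd}
    {mem mem' : Mem} {s : Saved} {init : List Img} {g : Img} {x : Exts} {lo hi : Nat}
    (hinv : HeapInv Hc rest fr top mem) (hok : GifOK Hc Fc R mem)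
    (hcur : 0x700000 ≤ R.cur ∧ R.cur + 16 ≤ 0x800000) (hbase : Hc.base = 0x800000)
    (hlast : DGifSlurp.Last Fc s init g) (hpend : Fc.pend = some x)
    (hlo : 0x700000 ≤ lo) (hhi : hi ≤ R.cur)
    (hun : ShadowUntouched mem mem')
    (hs : Mem.SameExcept
      [⟨lo, hi⟩,
       ⟨s.arr + 56 * init.length + 48, s.arr + 56 * init.length + 56⟩,
       ⟨s.arr + 56 * init.length + 40, s.arr + 56 * init.length + 44⟩,
       ⟨Fc.gif + 88, Fc.gif + 96⟩,
       ⟨Fc.gif + 80, Fc.gif + 84⟩] mem mem')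
    (r1 : rd mem' (s.arr + 56 * init.length + 48) 8 = x.arr)
    (r2 : rd mem' (s.arr + 56 * init.length + 40) 4 = x.blocks.length)
    (r3 : rd mem' (Fc.gif + 88) 8 = 0)
    (r4 : rd mem' (Fc.gif + 80) 4 = 0) :
    HeapInv Hc rest fr top mem' ∧ GifOK Hc (seg9_moved Fc s init g) R mem' ∧ rem R mem' = rem R mem := by
  -- where things are: the array's object `xs`, gif's object `xg`, 64 bytes apart, both above the stack
  have G := carry_Geo.intro hok.shape (hok.owns.placed hinv.heap) hinv.heap hcur
  have hsv0 := hok.shape.saved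
  rw [hlast.saved] at hsv0
  obtain ⟨k1, k2, k3, k4, k5⟩ := hsv0
  have hlen : s.imgs.length = init.length + 1 := by
    rw [hlast.imgs]
    simp only [List.length_append, List.length_singleton]
  have harr : (s.arr, 56 * s.imgs.length) ∈ Fc.structs := by
    unfold Forest.structs
    rw [hlast.saved]
    simp only [Saved.structs]
    exact List.mem_append_left _ (List.mem_append_right _ List.mem_cons_self)
  obtain ⟨xs, hxs, exs, cxs⟩ := G.structObj _ harr
  obtain ⟨xg, hxg, exg, cxg⟩ := G.gifObj
  simp only at exs cxs
  have hne : xs.base ≠ xg.base := by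
    rw [exs, exg]
    exact (G.struct_ne _ harr).1
  have hfar := G.far xs xg hxs hxg hne
  have hrs := hinv.heap.obj_range hxs
  have hrg := hinv.heap.obj_range hxg
  have his := hinv.heap.obj_inside hxs
  have hig := hinv.heap.obj_inside hxg
  rw [hbase, exs] at hrs
  rw [hbase, exg] at hrg
  rw [exs] at his hfar
  rw [exg] at hig hfar
  rw [hlen] at cxs
  -- every structural window of the forest but the array's reads the same
  have hkeep : ∀ o, o ∈ Fc.structs → o.1 ≠ s.arr → Mem.EqOn o.1 (o.1 + o.2) mem mem' := by
    intro o ho hoa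
    obtain ⟨y, hy, ey, cy⟩ := G.structObj o ho
    have hry := hinv.heap.obj_range hy
    rw [hbase, ey] at hry
    have hf1 := G.far y xs hy hxs (by
      rw [ey, exs]
      exact hoa)
    have hf2 := G.far y xg hy hxg (by
      rw [ey, exg]
      exact (G.struct_ne o ho).1)
    rw [ey, exs] at hf1
    rw [ey, exg] at hf2
    apply seg9_miss hs
    · omega
    · omega
    · omega
  -- THE HEAP'S INVARIANT: a stack window, two windows inside the array's object, two inside gif's
  have hinv' : HeapInv Hc rest fr top mem' := by
    apply hinv.sameExcept hun hs
    intro w hw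
    simp only [List.mem_cons, List.not_mem_nil, or_false] at hw
    rcases hw with e | e | e | e | e
    · rw [e]
      left
      left
      simp only
      omega
    · rw [e]
      right
      refine ⟨xs, hxs, ?_, ?_⟩
      · simp only
        omega
      · simp only
        omega
    · rw [e]
      right
      refine ⟨xs, hxs, ?_, ?_⟩
      · simp only
        omega
      · simp only
        omega
    · rw [e]
      right
      refine ⟨xg, hxg, ?_, ?_⟩
      · simp only
        omega
      · simp only
        omega
    · rw [e]
      right
      refine ⟨xg, hxg, ?_, ?_⟩
      · simp only
        omega
      · simp only
        omega
  -- THE READER: no window meets the cursor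
  have hrem : rem R mem' = rem R mem := by
    apply rem_sameExcept hs (by omega)
    intro w hw
    simp only [List.mem_cons, List.not_mem_nil, or_false] at hw
    rcases hw with e | e | e | e | e
    all_goals
      rw [e]
      simp only
      omega
  have hbound : ∀ o, o ∈ Fc.structs → o.1 + o.2 < 2 ^ 64 := by
    intro o ho
    obtain ⟨y, hy, ey, cy⟩ := G.structObj o ho
    have hiy := hinv.heap.obj_inside hy
    rw [ey] at hiy
    omega
  have himgs := seg9_img_structs G hlast.saved
  have hpends := seg9_pend_structs G hlast.saved
  have hgmem : g ∈ s.imgs := by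
    rw [hlast.imgs]
    exact List.mem_append_right _ (List.mem_singleton.mpr rfl)
  -- the last counted slot in the old memory
  have hk0 : init.length < s.imgs.length := by omega
  have himg := k5 init.length hk0
  have hget : s.imgs[init.length]'hk0 = g := by
    simp only [hlast.imgs, List.getElem_append_right (Nat.le_refl _), Nat.sub_self, List.getElem_cons_zero]
  rw [hget] at himg
  obtain ⟨i1, i2, i3⟩ := himg
  -- the slot's first 40 bytes (ImageDesc, RasterBits) read the same
  have hslotlo : Mem.EqOn (s.arr + 56 * init.length) (s.arr + 56 * init.length + 40) mem mem' := by
    apply seg9_miss hs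
    · omega
    · omega
    · omega
  -- the pending list in the old memory
  have hpe := hok.shape.pend
  rw [hpend] at hpe
  obtain ⟨p1, p2, p3, p4⟩ := hpe
  -- THE LAST SLOT IN THE NEW MEMORY: its colour map and raster as before, its extension list the pending one
  have himg' : ImgAt (s.arr + 56 * init.length) { g with ext := Fc.pend } mem' := by
    refine ⟨?_, ?_, ?_⟩
    · have e1 : SavedImage.ImageDesc.ColorMap mem' (s.arr + 56 * init.length) =
          SavedImage.ImageDesc.ColorMap mem (s.arr + 56 * init.length) := by
        simp only [gfield]
        exact hslotlo.rd _ 8 (by omega) (by omega) (by omega)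
      show MapAt g.cm _ mem'
      rw [e1]
      apply i1.frame
      · intro o ho
        have hin : o ∈ s.imgs.flatMap Img.structs :=
          List.mem_flatMap.mpr ⟨g, hgmem, List.mem_append_left _ ho⟩
        exact hkeep o (himgs o hin).1 (himgs o hin).2
      · intro m hm
        have hin : (m.obj, 24) ∈ s.imgs.flatMap Img.structs := by
          refine List.mem_flatMap.mpr ⟨g, hgmem, List.mem_append_left _ ?_⟩
          rw [hm]
          simp only [Map.structs, List.mem_singleton]
        exact hbound _ (himgs _ hin).1
    · have e2 : SavedImage.RasterBits mem' (s.arr + 56 * init.length) = SavedImage.RasterBits mem (s.arr + 56 * init.length) := by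
        simp only [gfield]
        exact hslotlo.rd _ 8 (by omega) (by omega) (by omega)
      have e5 : SavedImage.ImageDesc.Width mem' (s.arr + 56 * init.length) =
          SavedImage.ImageDesc.Width mem (s.arr + 56 * init.length) := by
        simp only [gfield]
        exact hslotlo.rd _ 4 (by omega) (by omega) (by omega)
      have e6 : SavedImage.ImageDesc.Height mem' (s.arr + 56 * init.length) =
          SavedImage.ImageDesc.Height mem (s.arr + 56 * init.length) := by
        simp only [gfield]
        exact hslotlo.rd _ 4 (by omega) (by omega) (by omega)
      show RasterAt g.raster _ mem'
      unfold RasterAt at i2 ⊢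
      cases hr : g.raster with
      | none =>
        rw [hr] at i2
        simp only at i2 ⊢
        rw [e2]
        exact i2
      | some r =>
        rw [hr] at i2
        simp only at i2 ⊢
        rw [e2, e5, e6]
        exact i2
    · show ExtsAt Fc.pend (SavedImage.ExtensionBlocks mem' _) (SavedImage.ExtensionBlockCount mem' _) mem'
      rw [hpend]
      refine ⟨?_, ?_, p3, ?_⟩
      · simp only [gfield]
        exact r1
      · simp only [gfield]
        exact r2
      · intro i hi
        have hin : (x.arr, 24 * x.blocks.length) ∈ Exts.structs Fc.pend := by
          rw [hpend]
          simp only [Exts.structs, List.mem_singleton]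
        have hke := hkeep _ (hpends _ hin).1 (hpends _ hin).2
        have hbd := hbound _ (hpends _ hin).1
        simp only at hke hbd
        apply (p4 i hi).frame
        · exact hke.mono (by omega) (by omega)
        · omega
  -- THE ARRAY IN THE NEW MEMORY
  have e7 : GifFileType.SavedImages mem' Fc.gif = GifFileType.SavedImages mem Fc.gif := by
    simp only [gfield]
    refine (seg9_miss hs (Fc.gif + 72) (Fc.gif + 80) ?_ ?_ ?_).rd _ 8 (by omega) (by omega) (by omega)
    · omega
    · omega
    · omega
  have e8 : GifFileType.ImageCount mem' Fc.gif = GifFileType.ImageCount mem Fc.gif := by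
    simp only [gfield]
    refine (seg9_miss hs (Fc.gif + 32) (Fc.gif + 36) ?_ ?_ ?_).rd _ 4 (by omega) (by omega) (by omega)
    · omega
    · omega
    · omega
  have hsv' : SavedAt (some { s with imgs := init ++ [{ g with ext := Fc.pend }] }) (GifFileType.SavedImages mem' Fc.gif)
      (GifFileType.ImageCount mem' Fc.gif) mem' := by
    rw [e7, e8]
    refine SavedAt.set_last ⟨k1, k2, k3, k4, k5⟩ hlast.imgs ?_ ?_ ?_ himg'
    · apply seg9_miss hs
      · omega
      · omega
      · omega
    · intro o ho
      obtain ⟨a, ha, hoa⟩ := List.mem_flatMap.mp ho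
      have hin : o ∈ s.imgs.flatMap Img.structs := by
        refine List.mem_flatMap.mpr ⟨a, ?_, hoa⟩
        rw [hlast.imgs]
        exact List.mem_append_left _ ha
      exact hkeep o (himgs o hin).1 (himgs o hin).2
    · intro o ho
      apply hbound
      unfold Forest.structs
      rw [hlast.saved]
      exact List.mem_append_left _ (List.mem_append_right _ ho)
  -- NOTHING IS PENDING
  have hpe' : ExtsAt none (GifFileType.ExtensionBlocks mem' Fc.gif) (GifFileType.ExtensionBlockCount mem' Fc.gif) mem' := by
    refine ⟨?_, ?_⟩
    · simp only [gfield]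
      exact r3
    · simp only [gfield]
      exact r4
  -- THE SHAPE: the five windows are loose (stack), inside the array's object, or inside `[gif + 72, gif + 96)`
  have hshape : Shape (seg9_moved Fc s init g) R mem' := by
    refine hok.shape.set_saved_pend (hok.owns.placed hinv.heap) hinv.heap hcur hs ?_ _ none hsv' hpe'
    intro w hw
    simp only [List.mem_cons, List.not_mem_nil, or_false] at hw
    rcases hw with e | e | e | e | e
    · left
      rw [e]
      apply Loose.stack hinv.heap
      · exact hlo
      · simp only
        omega
      · exact hhi
    · right
      right
      right
      refine ⟨s, xs, hlast.saved, hxs, exs, ?_, ?_⟩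
      · rw [e]
        simp only
        omega
      · rw [e]
        simp only
        omega
    · right
      right
      right
      refine ⟨s, xs, hlast.saved, hxs, exs, ?_, ?_⟩
      · rw [e]
        simp only
        omega
      · rw [e]
        simp only
        omega
    · right
      left
      rw [e]
      simp only
      omega
    · right
      left
      rw [e]
      simp only
      omega
  -- THE OWNED OBJECTS are the same, in another order
  have howns : Owns Hc (seg9_moved Fc s init g).owned :=
    hok.owns.perm (Forest.owned_move_pend Fc s init g hlast.saved hlast.imgs hlast.noext).symm
  exact ⟨hinv', ⟨howns, hshape⟩, hrem⟩

/-- **Every counted image of the forest after the move has its raster** (the last one got only an extension list). -/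
theorem seg9_moved_complete {Fc : Forest} {s : Saved} {init : List Img} {g : Img} (hlast : DGifSlurp.Last Fc s init g)
    (hr : g.raster ≠ none) : (seg9_moved Fc s init g).Complete := by
  intro s' hs' a ha
  have e : s' = { s with imgs := init ++ [{ g with ext := Fc.pend }] } := (Option.some.inj hs').symm
  rw [e] at ha
  rcases List.mem_append.mp ha with h1 | h2
  · exact hlast.done a h1
  · rw [List.mem_singleton.mp h2]
    exact hr

/-- **Every counted image is complete when the last has its raster** (the NULL arm: the forest stays). -/
theorem seg9_complete {Fc : Forest} {s : Saved} {init : List Img} {g : Img} (hlast : DGifSlurp.Last Fc s init g)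
    (hr : g.raster ≠ none) : Fc.Complete := by
  intro s' hs' a ha
  have e : s' = s := Option.some.inj (hs'.symm.trans hlast.saved)
  rw [e, hlast.imgs] at ha
  rcases List.mem_append.mp ha with h1 | h2
  · exact hlast.done a h1
  · rw [List.mem_singleton.mp h2]
    exact hr
/-- **10A7D4H … 10A81FH, THE NULL ARM** (dgif_lib.c:1266 `if (GifFile->ExtensionBlocks)`, nothing is pending): the checked load
of `gif.ExtensionBlocks` (0), `test ; je`. Only the check call's return address was stored; the forest stays. -/
theorem seg9_null (Lay : Layout) (hLay : Lay.hi = 0x1000000) (μ : Microarch) (hμ : UserX.MicroOK μ) (u₀ : State)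
    (hcode : HasCodeNat Lay u₀ Gif.L.DGifSlurp.entry Gif.Code.code_DGifSlurp.nat Gif.L.DGifSlurp.size)
    (h_load8 : Asan.SmallCheck Lay μ ProgX.Base.WayInv (ProgX.Base.CodeOK u₀) [.rax, .rcx, .rdx] 8
      ProgX.Base.L.__asan_load8_noabort.entry)
    (H : Heap) (rest : List Obj) (frames : List (Nat × FrameLayout)) (F : Forest) (R : Rd) (Hc : Heap) (Fc : Forest) (m : Nat)
    (e : State) (ret : Word) (v : State)
    (hat : DGifSlurp.IR Gif.L.DGifSlurp.at_10a7d4 H rest frames F R Hc Fc m u₀ e ret v)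
    (hpend : Fc.pend = none) :
    ReachVia Lay μ ProgX.Base.WayInv v (fun w =>
      ∃ (F' : Forest), DGifSlurp.Rec Gif.L.DGifSlurp.at_10a81f H rest frames F R Hc F' m u₀ e ret w) := by
  -- THE PRELUDE
  obtain ⟨hat_, hlz, hlast, hlt⟩ := hat
  obtain ⟨hcore, hregion, hgif, hpv, hinv, hok⟩ := hat_
  obtain ⟨s, init, g, r, n, hlast, hras, hr12⟩ := hlast
  have he := hcore.entry
  v_entry he
  obtain ⟨henv, hrdi, hcomp⟩ := hcore.pre
  have w_rip := hcore.rip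
  have c_rsp : v.reg .rsp = e.reg .rsp - 152 := hcore.rsp
  have c_rbp : v.reg .rbp = e.reg .rdi := hcore.rbp
  have w_kept : RegsKept [.rsp] v v := RegsKept.refl _ _
  have w_eq : Mem.EqOn ProgX.Base.L.textLo ProgX.Base.L.textHi u₀.mem v.mem := ProgX.Base.conv_code_eqOn hcore.code
  have hdf := (show abiInv _ from hcore.abi).1
  have hmx := (show abiInv _ from hcore.abi).2
  have hsse := ProgX.Base.sseOK_of_abiInv hcore.abi
  have k_r15 : v.mem.readLE (e.reg .rsp - 8) 8 = (e.reg .r15).toNat := hcore.slot_r15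
  have k_r14 : v.mem.readLE (e.reg .rsp - 16) 8 = (e.reg .r14).toNat := hcore.slot_r14
  have k_r13 : v.mem.readLE (e.reg .rsp - 24) 8 = (e.reg .r13).toNat := hcore.slot_r13
  have k_r12 : v.mem.readLE (e.reg .rsp - 32) 8 = (e.reg .r12).toNat := hcore.slot_r12
  have k_rbp : v.mem.readLE (e.reg .rsp - 40) 8 = (e.reg .rbp).toNat := hcore.slot_rbp
  have k_rbx : v.mem.readLE (e.reg .rsp - 48) 8 = (e.reg .rbx).toNat := hcore.slot_rbx
  have k_ra : UInt64.ofNat (v.mem.readLE (e.reg .rsp) 8) = ret := hcore.slot_ra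
  have hsame : Mem.SameExcept
    [⟨(e.reg .rsp).toNat - 848, (e.reg .rsp).toNat⟩,
     shadowSpan ((e.reg .rsp).toNat - 152) ((e.reg .rsp).toNat - 56),
     ⟨0x800000, 0x1000020⟩,
     ⟨R.cur, R.cur + 8⟩] e.mem v.mem := hcore.same
  -- where the cursor and gif are, as numbers
  have hcur := henv.ctx.cursor_range henv.heap.inv.shadow
  have hgin := hok.owns.inside hinv.heap (o := (Fc.gif, 120)) List.mem_cons_self
  have hbase := henv.heap.base
  have hbasec : Hc.base = 0x800000 := hregion.1.trans hbase
  simp only at hgin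
  rw [hbasec, hgif] at hgin
  have hg1 := hgin.1
  have hg2 := hgin.2.2.2.2
  clear hgin
  -- the field the segment loads: `gif.ExtensionBlocks = NULL`
  have hpe := hok.shape.pend
  rw [hpend] at hpe
  have l_ext : v.mem.readLE (e.reg .rdi + 0x58) 8 = 0 := by
    rw [rd_eq_readLE v.mem _ (F.gif + 88) 8 (by u_omega)]
    have := hpe.1
    simp only [gfield] at this
    rw [hgif] at this
    exact this
  -- gif is live under the body's frames
  have hgl : LiveIn (Hc.liveObjs ++ rest) (DGifSlurp.framesIn frames e) F.gif 120 := by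
    rw [← hgif]
    exact hok.gif_live.liveIn rest _ (Nat.le_refl _) (Nat.le_refl _)
  -- THE WALK
  u_walk hcode [hμ.vendor] until [Gif.L.DGifSlurp.at_10a81f] span [ProgX.Base.L.textLo, ProgX.Base.L.textHi] side (v_side)
  case check_10a7d8 =>
    -- dgif_lib.c:1266 the load of `gif.ExtensionBlocks`: 8 bytes inside gif
    have hun : ShadowUntouched v.mem s_10a7d8.mem := by v_untouched
    exact hgl.accSmall hinv.shadow hun _ 8 (by decide) (by u_omega) (by u_omega)
  -- 10A81FH: the one store since `v` is the check call's return address (stack)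
  obtain ⟨hinvA, hokA, hremA⟩ := store_stack hinv hok ⟨hcur.1, hcur.2.1⟩ (e.reg .rsp - 160) 8 1091549
    (by u_omega) (by u_omega)
  rw [← w_mem] at hinvA hokA hremA
  have hcore1 : DGifSlurp.Core Gif.L.DGifSlurp.at_10a81f H rest frames F R u₀ e ret s_10a7e4 := {
    entry := hcore.entry
    pre := hcore.pre
    rip := w_rip
    rsp := w_rsp
    rbp := (w_kept.get .rbp rfl).trans hcore.rbp
    r14 := (w_kept.get .r14 rfl).trans hcore.r14
    slot_r15 := by
      rw [w_mem]
      u_frame k_r15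
    slot_r14 := by
      rw [w_mem]
      u_frame k_r14
    slot_r13 := by
      rw [w_mem]
      u_frame k_r13
    slot_r12 := by
      rw [w_mem]
      u_frame k_r12
    slot_rbp := by
      rw [w_mem]
      u_frame k_rbp
    slot_rbx := by
      rw [w_mem]
      u_frame k_rbx
    slot_ra := by
      rw [w_mem]
      u_frame k_ra
    rem := by
      rw [hremA]
      exact hcore.rem
    same := by
      simp only [shadowSpan]
      simp only [shadowSpan] at hsame
      rw [w_mem]
      u_same
    code := ProgX.Base.conv_code_in w_eq
    abi := by
      refine ProgX.Base.abiInv_of ?_ ?_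
      · rw [w_flags]
        simp only [X86.User.df_setStatus]
        exact w_df_10a7d8
      · rw [w_mxcsr]
        exact hmx
  }
  refine ReachVia.done ⟨Fc, ?_⟩
  exact {
    at_ := {
      core := hcore1
      region := hregion
      gif := hgif
      pv := hpv
      inv := hinvA
      ok := hokA
    }
    complete := seg9_complete hlast (by
      rw [hras]
      exact Option.some_ne_none _)
    lt := by
      rw [hremA]
      exact hlt
  }


/-- **10A7D4H … 10A81FH, THE MOVE** (dgif_lib.c:1266-1272, a list `x` is pending): the checked load of `gif.ExtensionBlocks`, the
checked store of it to `sp->ExtensionBlocks`, the checked load of `gif.ExtensionBlockCount`, the checked store of it to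
`sp->ExtensionBlockCount`, the two stores that null the fields of gif. The forest becomes `seg9_moved` (`seg9_move_mem`). -/
theorem seg9_move (Lay : Layout) (hLay : Lay.hi = 0x1000000) (μ : Microarch) (hμ : UserX.MicroOK μ) (u₀ : State)
    (hcode : HasCodeNat Lay u₀ Gif.L.DGifSlurp.entry Gif.Code.code_DGifSlurp.nat Gif.L.DGifSlurp.size)
    (h_load8 : Asan.SmallCheck Lay μ ProgX.Base.WayInv (ProgX.Base.CodeOK u₀) [.rax, .rcx, .rdx] 8
      ProgX.Base.L.__asan_load8_noabort.entry)
    (h_store8 : Asan.SmallCheck Lay μ ProgX.Base.WayInv (ProgX.Base.CodeOK u₀) [.rax, .rcx, .rdx] 8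
      ProgX.Base.L.__asan_store8_noabort.entry)
    (h_load4 : Asan.SmallCheck Lay μ ProgX.Base.WayInv (ProgX.Base.CodeOK u₀) [.rax, .rcx, .rdx] 4
      ProgX.Base.L.__asan_load4_noabort.entry)
    (h_store4 : Asan.SmallCheck Lay μ ProgX.Base.WayInv (ProgX.Base.CodeOK u₀) [.rax, .rcx, .rdx] 4
      ProgX.Base.L.__asan_store4_noabort.entry)
    (H : Heap) (rest : List Obj) (frames : List (Nat × FrameLayout)) (F : Forest) (R : Rd) (Hc : Heap) (Fc : Forest) (m : Nat)
    (e : State) (ret : Word) (v : State)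
    (hat : DGifSlurp.IR Gif.L.DGifSlurp.at_10a7d4 H rest frames F R Hc Fc m u₀ e ret v)
    (x : Exts) (hpend : Fc.pend = some x) :
    ReachVia Lay μ ProgX.Base.WayInv v (fun w =>
      ∃ (F' : Forest), DGifSlurp.Rec Gif.L.DGifSlurp.at_10a81f H rest frames F R Hc F' m u₀ e ret w) := by
  -- THE PRELUDE
  obtain ⟨hat_, hlz, hlast, hlt⟩ := hat
  obtain ⟨hcore, hregion, hgif, hpv, hinv, hok⟩ := hat_
  obtain ⟨s, init, g, r, n, hlast, hras, hr12⟩ := hlast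
  have he := hcore.entry
  v_entry he
  obtain ⟨henv, hrdi, hcomp⟩ := hcore.pre
  have w_rip := hcore.rip
  have c_rsp : v.reg .rsp = e.reg .rsp - 152 := hcore.rsp
  have c_rbp : v.reg .rbp = e.reg .rdi := hcore.rbp
  -- `r12 = sp` as a variable `z`
  obtain ⟨z, c_r12⟩ : ∃ z, v.reg .r12 = z := ⟨_, rfl⟩
  rw [c_r12] at hr12
  have w_kept : RegsKept [.rsp] v v := RegsKept.refl _ _
  have w_eq : Mem.EqOn ProgX.Base.L.textLo ProgX.Base.L.textHi u₀.mem v.mem := ProgX.Base.conv_code_eqOn hcore.code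
  have hdf := (show abiInv _ from hcore.abi).1
  have hmx := (show abiInv _ from hcore.abi).2
  have hsse := ProgX.Base.sseOK_of_abiInv hcore.abi
  have k_r15 : v.mem.readLE (e.reg .rsp - 8) 8 = (e.reg .r15).toNat := hcore.slot_r15
  have k_r14 : v.mem.readLE (e.reg .rsp - 16) 8 = (e.reg .r14).toNat := hcore.slot_r14
  have k_r13 : v.mem.readLE (e.reg .rsp - 24) 8 = (e.reg .r13).toNat := hcore.slot_r13
  have k_r12 : v.mem.readLE (e.reg .rsp - 32) 8 = (e.reg .r12).toNat := hcore.slot_r12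
  have k_rbp : v.mem.readLE (e.reg .rsp - 40) 8 = (e.reg .rbp).toNat := hcore.slot_rbp
  have k_rbx : v.mem.readLE (e.reg .rsp - 48) 8 = (e.reg .rbx).toNat := hcore.slot_rbx
  have k_ra : UInt64.ofNat (v.mem.readLE (e.reg .rsp) 8) = ret := hcore.slot_ra
  have hsame : Mem.SameExcept
    [⟨(e.reg .rsp).toNat - 848, (e.reg .rsp).toNat⟩,
     shadowSpan ((e.reg .rsp).toNat - 152) ((e.reg .rsp).toNat - 56),
     ⟨0x800000, 0x1000020⟩,
     ⟨R.cur, R.cur + 8⟩] e.mem v.mem := hcore.same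
  -- where the cursor, gif, the array and the pending list are, as numbers
  have hcur := henv.ctx.cursor_range henv.heap.inv.shadow
  have hbase := henv.heap.base
  have hbasec : Hc.base = 0x800000 := hregion.1.trans hbase
  have hgin := hok.owns.inside hinv.heap (o := (Fc.gif, 120)) List.mem_cons_self
  simp only at hgin
  rw [hbasec, hgif] at hgin
  have hg1 := hgin.1
  have hg2 := hgin.2.2.2.2
  clear hgin
  have hsmem : (s.arr, 56 * s.cap) ∈ Fc.owned := by
    unfold Forest.owned
    rw [hlast.saved]
    simp only [Saved.objs]
    exact List.mem_cons_of_mem _ (List.mem_cons_of_mem _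
      (List.mem_append_left _ (List.mem_append_right _ List.mem_cons_self)))
  have hxmem : (x.arr, 24 * x.cap) ∈ Fc.owned := by
    unfold Forest.owned
    rw [hpend]
    simp only [Exts.objs]
    exact List.mem_cons_of_mem _ (List.mem_cons_of_mem _ (List.mem_append_right _ List.mem_cons_self))
  have hsin := hok.owns.inside hinv.heap hsmem
  simp only at hsin
  rw [hbasec] at hsin
  have hs1 := hsin.1
  have hs2 := hsin.2.2.2.2
  clear hsin
  have hxin := hok.owns.inside hinv.heap hxmem
  simp only at hxin
  rw [hbasec] at hxin
  have hx1 := hxin.1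
  have hx2 := hxin.2.2.2.2
  clear hxin
  have hfar := hok.owns.far hinv.heap (a := (Fc.gif, 120)) (b := (s.arr, 56 * s.cap)) List.mem_cons_self hsmem (by
    intro e0
    have e1 : Fc.gif = s.arr := congrArg Prod.fst e0
    have G := carry_Geo.intro hok.shape (hok.owns.placed hinv.heap) hinv.heap ⟨hcur.1, hcur.2.1⟩
    have harr : (s.arr, 56 * s.imgs.length) ∈ Fc.structs := by
      unfold Forest.structs
      rw [hlast.saved]
      simp only [Saved.structs]
      exact List.mem_append_left _ (List.mem_append_right _ List.mem_cons_self)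
    exact (G.struct_ne _ harr).1 e1.symm)
  simp only at hfar
  rw [hgif] at hfar
  -- the last slot lies inside the array: `init.length + 1 ≤ s.cap`
  have hsv0 := hok.shape.saved
  rw [hlast.saved] at hsv0
  have hcap : init.length + 1 ≤ s.cap := by
    have := hsv0.2.2.1
    rw [hlast.imgs] at this
    simp only [List.length_append, List.length_singleton] at this
    exact this
  clear hsv0
  -- the fields the segment loads: `gif.ExtensionBlocks = x.arr`, `gif.ExtensionBlockCount = x.blocks.length`
  have hpe := hok.shape.pend
  rw [hpend] at hpe
  have l_ext : v.mem.readLE (e.reg .rdi + 0x58) 8 = x.arr := by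
    rw [rd_eq_readLE v.mem _ (F.gif + 88) 8 (by u_omega)]
    have := hpe.1
    simp only [gfield] at this
    rw [hgif] at this
    exact this
  have l_cnt : v.mem.readLE (e.reg .rdi + 0x50) 4 = x.blocks.length := by
    rw [rd_eq_readLE v.mem _ (F.gif + 80) 4 (by u_omega)]
    have := hpe.2.1
    simp only [gfield] at this
    rw [hgif] at this
    exact this
  have hxlen : x.blocks.length ≤ x.cap := hpe.2.2.1
  -- gif and the array are live under the body's frames
  have hgl : LiveIn (Hc.liveObjs ++ rest) (DGifSlurp.framesIn frames e) F.gif 120 := by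
    rw [← hgif]
    exact hok.gif_live.liveIn rest _ (Nat.le_refl _) (Nat.le_refl _)
  have hsl : LiveIn (Hc.liveObjs ++ rest) (DGifSlurp.framesIn frames e) s.arr (56 * s.cap) :=
    (hok.owns.live _ hsmem).liveIn rest _ (Nat.le_refl _) (Nat.le_refl _)
  -- THE WALK
  u_walk hcode [hμ.vendor] until [Gif.L.DGifSlurp.at_10a81f] span [ProgX.Base.L.textLo, ProgX.Base.L.textHi] side (v_side)
  case check_10a7d8 =>
    -- dgif_lib.c:1266 the load of `gif.ExtensionBlocks`: 8 bytes inside gif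
    have hun : ShadowUntouched v.mem s_10a7d8.mem := by v_untouched
    exact hgl.accSmall hinv.shadow hun _ 8 (by decide) (by u_omega) (by u_omega)
  case check_10a7eb =>
    -- dgif_lib.c:1267 the store of `sp->ExtensionBlocks`: 8 bytes inside the last counted slot of the array
    have hun : ShadowUntouched v.mem s_10a7eb.mem := by v_untouched
    exact hsl.accSmall hinv.shadow hun _ 8 (by decide) (by u_omega) (by u_omega)
  case check_10a7f9 =>
    -- dgif_lib.c:1269 the load of `gif.ExtensionBlockCount`: 4 bytes inside gif
    have hun : ShadowUntouched v.mem s_10a7f9.mem := by v_untouched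
    exact hgl.accSmall hinv.shadow hun _ 4 (by decide) (by u_omega) (by u_omega)
  case check_10a806 =>
    -- dgif_lib.c:1268 the store of `sp->ExtensionBlockCount`: 4 bytes inside the last counted slot
    have hun : ShadowUntouched v.mem s_10a806.mem := by v_untouched
    exact hsl.accSmall hinv.shadow hun _ 4 (by decide) (by u_omega) (by u_omega)
  -- 10A81FH (dgif_lib.c:1315): THE FOUR STORES ARE DONE. The values stored, as numbers
  have ex : (UInt64.ofNat x.arr).toNat = x.arr := toNat_ofNat_addr _ (by omega)
  have ec : (BitVec.ofNat 32 x.blocks.length).toNat = x.blocks.length := by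
    rw [BitVec.toNat_ofNat]
    exact Nat.mod_eq_of_lt (by omega)
  rw [ex, ec] at w_mem
  clear hbr_10a7e4
  -- the footprint since `v`: the return addresses of the check calls (one stack slot), the two fields of the slot, the two of gif
  have hs : Mem.SameExcept
    [⟨(e.reg .rsp).toNat - 160, (e.reg .rsp).toNat - 152⟩,
     ⟨s.arr + 56 * init.length + 48, s.arr + 56 * init.length + 56⟩,
     ⟨s.arr + 56 * init.length + 40, s.arr + 56 * init.length + 44⟩,
     ⟨F.gif + 88, F.gif + 96⟩,
     ⟨F.gif + 80, F.gif + 84⟩] v.mem s_10a818.mem := by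
    rw [w_mem]
    u_same
  have hun : ShadowUntouched v.mem s_10a818.mem := by v_untouched
  -- the four fields read back
  have r1 : rd s_10a818.mem (s.arr + 56 * init.length + 48) 8 = x.arr := by
    rw [w_mem]
    rw [rd_writeLE_disjoint _ _ _ _ _ _ (by u_omega) (by omega) (by u_omega)]
    rw [rd_writeLE_disjoint _ _ _ _ _ _ (by u_omega) (by omega) (by u_omega)]
    rw [rd_writeLE_disjoint _ _ _ _ _ _ (by u_omega) (by omega) (by u_omega)]
    rw [rd_writeLE_disjoint _ _ _ _ _ _ (by u_omega) (by omega) (by u_omega)]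
    rw [rd_writeLE_same _ (z + 48) 8 x.arr _ (by u_omega) (by decide)]
    exact Nat.mod_eq_of_lt (by omega)
  have r2 : rd s_10a818.mem (s.arr + 56 * init.length + 40) 4 = x.blocks.length := by
    rw [w_mem]
    rw [rd_writeLE_disjoint _ _ _ _ _ _ (by u_omega) (by omega) (by u_omega)]
    rw [rd_writeLE_disjoint _ _ _ _ _ _ (by u_omega) (by omega) (by u_omega)]
    rw [rd_writeLE_same _ (z + 40) 4 x.blocks.length _ (by u_omega) (by decide)]
    exact Nat.mod_eq_of_lt (by omega)
  have r3 : rd s_10a818.mem (F.gif + 88) 8 = 0 := by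
    rw [w_mem]
    rw [rd_writeLE_disjoint _ _ _ _ _ _ (by u_omega) (by omega) (by u_omega)]
    rw [rd_writeLE_same _ (e.reg .rdi + 88) 8 0 _ (by u_omega) (by decide)]
  have r4 : rd s_10a818.mem (F.gif + 80) 4 = 0 := by
    rw [w_mem]
    rw [rd_writeLE_same _ (e.reg .rdi + 80) 4 0 _ (by u_omega) (by decide)]
  -- THE STEP OF THE INVARIANTS
  rw [← hgif] at hs r3 r4
  obtain ⟨hinvA, hokA, hremA⟩ := seg9_move_mem hinv hok ⟨hcur.1, hcur.2.1⟩ hbasec hlast hpend (by omega) (by omega) hun hs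
    r1 r2 r3 r4
  clear hs r1 r2 r3 r4
  have hcore1 : DGifSlurp.Core Gif.L.DGifSlurp.at_10a81f H rest frames F R u₀ e ret s_10a818 := {
    entry := hcore.entry
    pre := hcore.pre
    rip := w_rip
    rsp := w_rsp
    rbp := (w_kept.get .rbp rfl).trans hcore.rbp
    r14 := (w_kept.get .r14 rfl).trans hcore.r14
    slot_r15 := by
      rw [w_mem]
      u_frame k_r15
    slot_r14 := by
      rw [w_mem]
      u_frame k_r14
    slot_r13 := by
      rw [w_mem]
      u_frame k_r13
    slot_r12 := by
      rw [w_mem]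
      u_frame k_r12
    slot_rbp := by
      rw [w_mem]
      u_frame k_rbp
    slot_rbx := by
      rw [w_mem]
      u_frame k_rbx
    slot_ra := by
      rw [w_mem]
      u_frame k_ra
    rem := by
      rw [hremA]
      exact hcore.rem
    same := by
      simp only [shadowSpan]
      simp only [shadowSpan] at hsame
      rw [w_mem]
      u_same
    code := ProgX.Base.conv_code_in w_eq
    abi := by
      refine ProgX.Base.abiInv_of ?_ ?_
      · rw [w_flags]
        exact w_df_10a806
      · rw [w_mxcsr]
        exact hmx
  }
  refine ReachVia.done ⟨seg9_moved Fc s init g, ?_⟩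
  exact {
    at_ := {
      core := hcore1
      region := hregion
      gif := hgif
      pv := hpv
      inv := hinvA
      ok := hokA
    }
    complete := seg9_moved_complete hlast (by
      rw [hras]
      exact Option.some_ne_none _)
    lt := by
      rw [hremA]
      exact hlt
  }

end Gif.Spec.DGifSlurp_9
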